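-- pv_equiv track=rewrite | github.com/TianleJin/Algorithmic-Contests-Solutions | Atcoder/ABC175/d.py | maximise
-- ===== SOURCE A (Python) =====
-- from collections import deque
--
-- def maximise(R, cycle):
--     cur = 0
--     L = len(cycle)
--     ans = max(cycle)
--     queue = deque([0])
--     dp = [0] * (2 * L + 1)
--     for i, num in enumerate(cycle + cycle):
--         cur += num
--         while queue and i + 1 - queue[0] > R:
--             queue.popleft()
--         if queue:
--             ans = max(ans, cur - dp[queue[0]])
--         while queue and dp[queue[-1]] >= cur:
--             queue.pop()
--         queue.append(i + 1)
--         dp[i + 1] = cur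
--     return ans
-- ===== SOURCE B (Python) =====
-- def maximise(R, cycle):
--     # Direct scan: best sum of a contiguous segment of length 1..R in cycle+cycle,
--     # seeded with max(cycle); no deque/dp table needed.
--     L = len(cycle)
--     arr = cycle + cycle
--     ans = max(cycle)
--     for s in range(2 * L):
--         total = 0
--         for e in range(s, min(s + R, 2 * L)):
--             total += arr[e]
--             if total > ans:
--                 ans = total
--     return ans
-- ===== Notes on version B (the rewrite author's own statement) =====
-- stated objective: simpler
-- what changed: Replaces the monotonic-deque-over-prefix-sums sliding-window-minimum machinery (deque, dp table, prefix accumulator) by a plain direct scan: for every start position in cycle+cycle, accumulate the running sum of the at-most-R following elements and keep the best, seeded with max(cycle).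
import Mathlib
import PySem

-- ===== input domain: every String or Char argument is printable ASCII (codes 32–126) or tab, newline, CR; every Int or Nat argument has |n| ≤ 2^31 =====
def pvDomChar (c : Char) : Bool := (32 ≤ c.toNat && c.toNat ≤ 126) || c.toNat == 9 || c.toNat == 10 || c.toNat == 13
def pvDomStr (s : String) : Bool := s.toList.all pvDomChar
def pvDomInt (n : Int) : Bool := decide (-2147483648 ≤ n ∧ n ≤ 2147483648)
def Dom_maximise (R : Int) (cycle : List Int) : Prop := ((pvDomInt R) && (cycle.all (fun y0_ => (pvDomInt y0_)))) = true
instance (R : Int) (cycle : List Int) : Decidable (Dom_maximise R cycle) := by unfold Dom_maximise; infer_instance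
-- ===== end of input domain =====

-- B replaces A's monotonic-deque/dp-table sliding-window-minimum machinery by a plain
-- direct scan over all segment start positions (simpler, not faster).

-- ===== PORT A =====
-- 'while queue and i + 1 - queue[0] > R: queue.popleft()'
def maximiseDropFront (R e : Int) : List Int → List Int
  | [] => []
  | j :: rest => if e - j > R then maximiseDropFront R e rest else j :: rest

-- 'while queue and dp[queue[-1]] >= cur: queue.pop()'  (processed from the back inward)
def maximiseDropBack (cur : Int) (dp : List Int) : List Int → List Int
  | [] => []
  | j :: rest =>
    let r := maximiseDropBack cur dp rest
    if r.isEmpty then (if PySem.List.pyGetD dp j 0 ≥ cur then [] else [j]) else j :: r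

-- one iteration of A's 'for i, num in enumerate(cycle + cycle)' body; state = (cur, ans, queue, dp)
def maximiseStep (R : Int) (st : Int × Int × List Int × List Int) (p : Int × Int) :
    Int × Int × List Int × List Int :=
  let i := p.1
  let num := p.2
  let cur := st.1 + num
  let dp := st.2.2.2
  let q1 := maximiseDropFront R (i+1) st.2.2.1
  let ans1 := match q1 with
    | [] => st.2.1
    | j :: _ => max st.2.1 (cur - PySem.List.pyGetD dp j 0)
  let q2 := maximiseDropBack cur dp q1
  (cur, ans1, q2 ++ [i+1], PySem.List.pySetD dp (i+1) cur)

def maximise (R : Int) (cycle : List Int) : Int :=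
  if cycle = [] then 0 else  -- Python raises ValueError on max([]) ; excluded by Pre_
    let L := cycle.length
    (((PySem.List.enumerate (cycle ++ cycle) 0).foldl (maximiseStep R)
      (0, (PySem.List.max? cycle (fun y => y)).getD 0, [0], List.replicate (2*L+1) 0))).2.1

-- ===== PORT B =====
def maximise_alt (R : Int) (cycle : List Int) : Int :=
  if cycle = [] then 0 else  -- Python raises ValueError on max([]) ; excluded by Pre_
    let L := cycle.length
    let arr := cycle ++ cycle
    (PySem.List.pyRange 0 (2*(L:Int)) 1).foldl
      (fun ans s =>
        ((PySem.List.pyRange s (min (s+R) (2*(L:Int))) 1).foldl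
          (fun (p : Int × Int) e =>
            let total := p.1 + PySem.List.pyGetD arr e 0
            (total, if total > p.2 then total else p.2)) (0, ans)).2)
      ((PySem.List.max? cycle (fun y => y)).getD 0)

-- ===== PRECONDITION & SPEC =====
-- Pre_ excludes only the empty list, on which both Pythons raise ValueError at max(cycle).
def Pre_maximise (R : Int) (cycle : List Int) : Prop := cycle ≠ []
instance (R : Int) (cycle : List Int) : Decidable (Pre_maximise R cycle) := by unfold Pre_maximise; infer_instance
def pvWitness_maximise : Int × List Int := (2, [3, -1, 4])

def Spec_maximise (R : Int) (cycle : List Int) (out : Int) : Prop := out = maximise_alt R cycle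
instance (R : Int) (cycle : List Int) (out : Int) : Decidable (Spec_maximise R cycle out) := by unfold Spec_maximise; infer_instance

-- ===== CLAIM (what is proved, stated in full; the proofs are below) =====
def Claim_equal_maximise : Prop := ∀ (R : Int) (cycle : List Int), Dom_maximise R cycle → Pre_maximise R cycle → Spec_maximise R cycle (maximise R cycle)

-- ===== LEMMAS AND PROOFS =====

/- Prefix sums of arr: pvPfx arr e = sum of the first e elements (Python's dp[e] / cur). -/
def pvPfx (arr : List Int) (e : Nat) : Int := (arr.take e).sum

/- j is a strict minimum towards the right among indices ≤ k. -/
def pvIsMin (arr : List Int) (j k : Nat) : Bool :=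
  (List.range (k+1)).all (fun j' => decide (j < j' → pvPfx arr j < pvPfx arr j'))

/- queue contents after the full iteration for index k (element k just pushed). -/
def pvGoodQ (R : Int) (arr : List Int) (k j : Nat) : Bool :=
  (j == k || decide ((k:Int) - (j:Int) ≤ R)) && pvIsMin arr j k

/- queue contents in iteration k after the popleft with threshold (k+1). -/
def pvGoodM (R : Int) (arr : List Int) (k j : Nat) : Bool :=
  decide (((k:Int)+1) - (j:Int) ≤ R) && pvIsMin arr j k

def pvQ (R : Int) (arr : List Int) (k : Nat) : List Int :=
  ((List.range (k+1)).filter (pvGoodQ R arr k)).map (Nat.cast : Nat → Int)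

def pvQM (R : Int) (arr : List Int) (k : Nat) : List Int :=
  ((List.range (k+1)).filter (pvGoodM R arr k)).map (Nat.cast : Nat → Int)

/- window of admissible segment starts for endpoint e. -/
def pvW (R : Int) (e : Nat) : List Nat :=
  (List.range e).filter (fun j => decide ((e:Int) - (j:Int) ≤ R))

def pvWmin (R : Int) (arr : List Int) (e : Nat) : Option Nat :=
  PySem.List.min? (pvW R e) (fun j => pvPfx arr j)

def pvAns (R : Int) (arr : List Int) (a0 : Int) : Nat → Int
  | 0 => a0
  | k+1 =>
    match pvWmin R arr (k+1) with
    | none => pvAns R arr a0 k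
    | some j => max (pvAns R arr a0 k) (pvPfx arr (k+1) - pvPfx arr j)

def pvDp (arr : List Int) (n k : Nat) : List Int :=
  (List.range (k+1)).map (pvPfx arr) ++ List.replicate (n - k) 0

def pvState (R : Int) (arr : List Int) (a0 : Int) (n k : Nat) : Int × Int × List Int × List Int :=
  (pvPfx arr k, pvAns R arr a0 k, pvQ R arr k, pvDp arr n k)

-- ## small facts

lemma pvPfx_succ (arr : List Int) (k : Nat) (hk : k < arr.length) :
    pvPfx arr (k+1) = pvPfx arr k + arr[k] := by
  unfold pvPfx
  exact List.sum_take_succ arr k hk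

lemma pvIsMin_self (arr : List Int) (k : Nat) : pvIsMin arr k k = true := by
  unfold pvIsMin
  rw [List.all_eq_true]
  intro j' hj'
  simp only [List.mem_range] at hj'
  simp only [decide_eq_true_eq]
  intro h
  omega

lemma pvIsMin_lt (arr : List Int) (j k j' : Nat) (h : pvIsMin arr j k = true)
    (h1 : j < j') (h2 : j' ≤ k) : pvPfx arr j < pvPfx arr j' := by
  unfold pvIsMin at h
  rw [List.all_eq_true] at h
  have h3 := h j' (by simp only [List.mem_range]; omega)
  rw [decide_eq_true_eq] at h3
  exact h3 h1

lemma pvIsMin_false (arr : List Int) (j k : Nat) (h : pvIsMin arr j k = false) :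
    ∃ j', j' ≤ k ∧ j < j' ∧ pvPfx arr j' ≤ pvPfx arr j := by
  by_contra hc
  push_neg at hc
  have : pvIsMin arr j k = true := by
    unfold pvIsMin
    rw [List.all_eq_true]
    intro j' hj'
    simp only [List.mem_range] at hj'
    simp only [decide_eq_true_eq]
    intro hlt
    exact hc j' (by omega) hlt
  simp [this] at h

lemma pvIsMin_succ (arr : List Int) (j k : Nat) (hj : j ≤ k) :
    pvIsMin arr j (k+1) = (pvIsMin arr j k && decide (pvPfx arr j < pvPfx arr (k+1))) := by
  unfold pvIsMin
  rw [List.range_succ, List.all_append]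
  simp only [List.all_cons, List.all_nil, Bool.and_true]
  congr 1
  rw [decide_eq_decide]
  constructor
  · intro h; exact h (by omega)
  · intro h _; exact h

lemma pvDp_get (arr : List Int) (n k j : Nat) (hj : j ≤ k) :
    PySem.List.pyGetD (pvDp arr n k) ((j:Nat):Int) 0 = pvPfx arr j := by
  unfold pvDp
  rw [PySem.List.pyGetD_natCast]
  have hlen : j < ((List.range (k+1)).map (pvPfx arr)).length := by simp; omega
  rw [List.getD_append _ _ _ _ hlen, List.getD_eq_getElem _ _ hlen]
  simp

lemma pvDp_set (arr : List Int) (n k : Nat) (hk : k < n) :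
    PySem.List.pySetD (pvDp arr n k) ((k:Int)+1) (pvPfx arr (k+1)) = pvDp arr n (k+1) := by
  unfold pvDp
  have hc : ((k:Int)+1) = (((k+1:Nat)):Int) := by push_cast; ring
  rw [hc, PySem.List.pySetD_natCast]
  rw [List.set_append]
  simp only [List.length_map, List.length_range]
  rw [if_neg (by omega)]
  have h2 : n - k = (n - (k+1)) + 1 := by omega
  rw [h2, List.replicate_succ]
  have h3 : k + 1 - (k+1) = 0 := by omega
  rw [h3, List.set_cons_zero]
  simp [List.range_succ]

-- ## casts of sorted Nat lists

lemma pv_filter_map (p : Int → Bool) (l : List Nat) :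
    (l.map (Nat.cast : Nat → Int)).filter p
      = (l.filter (fun (j : Nat) => p (j:Int))).map (Nat.cast : Nat → Int) := by
  induction l with
  | nil => rfl
  | cons x t ih =>
    by_cases h : p (x:Int) <;> simp [List.filter_cons, h, ih]

lemma pv_pairwise_cast (l : List Nat) (h : l.Pairwise (· < ·)) :
    (l.map (Nat.cast : Nat → Int)).Pairwise (· < ·) := by
  rw [List.pairwise_map]
  exact h.imp (fun hab => by exact_mod_cast hab)

-- ## popleft = filter on a sorted list

lemma dropFront_eq_filter (R e : Int) (l : List Int) (h : l.Pairwise (· < ·)) :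
    maximiseDropFront R e l = l.filter (fun j => decide (e - j ≤ R)) := by
  induction l with
  | nil => simp [maximiseDropFront]
  | cons j t ih =>
    rcases List.pairwise_cons.mp h with ⟨hj, ht⟩
    by_cases hc : e - j > R
    · simp only [maximiseDropFront]
      rw [if_pos hc, ih ht, List.filter_cons]
      rw [if_neg (by simp; omega)]
    · simp only [maximiseDropFront]
      rw [if_neg hc, List.filter_cons]
      rw [if_pos (by simp; omega)]
      have : t.filter (fun j => decide (e - j ≤ R)) = t := by
        rw [List.filter_eq_self]
        intro x hx
        have := hj x hx
        simp
        omega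
      rw [this]

lemma pvQ_pairwise (R : Int) (arr : List Int) (k : Nat) :
    (pvQ R arr k).Pairwise (· < ·) := by
  unfold pvQ
  exact pv_pairwise_cast _ ((List.pairwise_lt_range).filter _)

lemma pvQ1_eq (R : Int) (arr : List Int) (k : Nat) :
    maximiseDropFront R ((k:Int)+1) (pvQ R arr k) = pvQM R arr k := by
  rw [dropFront_eq_filter _ _ _ (pvQ_pairwise R arr k)]
  unfold pvQ pvQM
  rw [pv_filter_map]
  congr 1
  rw [List.filter_filter]
  apply List.filter_congr
  intro j hj
  simp only [List.mem_range] at hj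
  unfold pvGoodQ pvGoodM
  cases him : pvIsMin arr j k <;> by_cases hR : ((k:Int)+1) - (j:Int) ≤ R <;>
    simp [him, hR] <;> omega

-- ## pop-from-back = filter on a value-sorted list

lemma dropBack_eq_filter (cur : Int) (dp : List Int) (l : List Int)
    (h : l.Pairwise (fun a b => PySem.List.pyGetD dp a 0 < PySem.List.pyGetD dp b 0)) :
    maximiseDropBack cur dp l = l.filter (fun j => decide (PySem.List.pyGetD dp j 0 < cur)) := by
  induction l with
  | nil => simp [maximiseDropBack]
  | cons j t ih =>
    rcases List.pairwise_cons.mp h with ⟨hj, ht⟩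
    simp only [maximiseDropBack, ih ht]
    rcases hr : t.filter (fun j => decide (PySem.List.pyGetD dp j 0 < cur)) with _ | ⟨x, xs⟩
    · by_cases hc : PySem.List.pyGetD dp j 0 ≥ cur
      · simp [List.filter_cons, hr, hc, show ¬(PySem.List.pyGetD dp j 0 < cur) by omega]
      · simp [List.filter_cons, hr, hc, show (PySem.List.pyGetD dp j 0 < cur) by omega]
    · have hx : x ∈ t.filter (fun j => decide (PySem.List.pyGetD dp j 0 < cur)) := by
        rw [hr]; exact List.mem_cons_self
      rcases List.mem_filter.mp hx with ⟨hxt, hpx⟩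
      rw [decide_eq_true_eq] at hpx
      have hpj : PySem.List.pyGetD dp j 0 < cur := lt_trans (hj x hxt) hpx
      simp [List.filter_cons, hr, hpj, show ¬(PySem.List.pyGetD dp j 0 ≥ cur) by omega]

lemma pvQM_pairwise (R : Int) (arr : List Int) (n k : Nat) :
    (pvQM R arr k).Pairwise
      (fun a b => PySem.List.pyGetD (pvDp arr n k) a 0 < PySem.List.pyGetD (pvDp arr n k) b 0) := by
  unfold pvQM
  rw [List.pairwise_map]
  have base : ((List.range (k+1)).filter (pvGoodM R arr k)).Pairwise (· < ·) :=
    (List.pairwise_lt_range).filter _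
  refine base.imp_of_mem ?_
  intro a b ha hb hlt
  rcases List.mem_filter.mp ha with ⟨har, hag⟩
  rcases List.mem_filter.mp hb with ⟨hbr, hbg⟩
  simp only [List.mem_range] at har hbr
  rw [pvDp_get arr n k a (by omega), pvDp_get arr n k b (by omega)]
  unfold pvGoodM at hag
  rw [Bool.and_eq_true] at hag
  exact pvIsMin_lt arr a k b hag.2 hlt (by omega)

lemma pvQ2_eq (R : Int) (arr : List Int) (n k : Nat) :
    maximiseDropBack (pvPfx arr (k+1)) (pvDp arr n k) (pvQM R arr k) ++ [(k:Int)+1]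
      = pvQ R arr (k+1) := by
  rw [dropBack_eq_filter _ _ _ (pvQM_pairwise R arr n k)]
  unfold pvQM pvQ
  rw [pv_filter_map, List.filter_filter]
  conv_rhs => rw [List.range_succ, List.filter_append, List.map_append]
  congr 1
  · congr 1
    apply List.filter_congr
    intro j hj
    simp only [List.mem_range] at hj
    rw [pvDp_get arr n k j (by omega)]
    unfold pvGoodM pvGoodQ
    rw [pvIsMin_succ arr j k (by omega)]
    have hb : (j == k+1) = false := by simp; omega
    cases him : pvIsMin arr j k <;>
      by_cases hR : ((k:Int)+1) - (j:Int) ≤ R <;>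
        by_cases hP : pvPfx arr j < pvPfx arr (k+1) <;>
          simp [him, hR, hP, hb] <;> (try push_cast) <;> (try omega)
  · have hgood : pvGoodQ R arr (k+1) (k+1) = true := by
      unfold pvGoodQ; simp [pvIsMin_self]
    simp [hgood]

-- ## emptiness

lemma pvW_nonempty_iff (R : Int) (k : Nat) : pvW R (k+1) ≠ [] ↔ 1 ≤ R := by
  unfold pvW
  constructor
  · intro h
    rcases List.exists_mem_of_ne_nil _ h with ⟨j, hjmem⟩
    rcases List.mem_filter.mp hjmem with ⟨hjr, hjd⟩
    simp only [List.mem_range] at hjr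
    rw [decide_eq_true_eq] at hjd
    have : (j:Int) ≤ (k:Int) := by exact_mod_cast Nat.lt_succ_iff.mp hjr
    push_cast at hjd
    omega
  · intro hR
    apply List.ne_nil_of_mem (a := k)
    rw [List.mem_filter]
    refine ⟨by simp, ?_⟩
    rw [decide_eq_true_eq]
    push_cast
    omega

lemma pvQM_nonempty_iff (R : Int) (arr : List Int) (k : Nat) : pvQM R arr k ≠ [] ↔ 1 ≤ R := by
  unfold pvQM
  constructor
  · intro h
    have h2 : (List.range (k+1)).filter (pvGoodM R arr k) ≠ [] := by
      intro hx; rw [hx] at h; simp at h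
    rcases List.exists_mem_of_ne_nil _ h2 with ⟨j, hjmem⟩
    rcases List.mem_filter.mp hjmem with ⟨hjr, hjd⟩
    simp only [List.mem_range] at hjr
    unfold pvGoodM at hjd
    rw [Bool.and_eq_true] at hjd
    have hR := hjd.1
    rw [decide_eq_true_eq] at hR
    have : (j:Int) ≤ (k:Int) := by exact_mod_cast Nat.lt_succ_iff.mp hjr
    omega
  · intro hR
    have hmem : (k:Int) ∈ ((List.range (k+1)).filter (pvGoodM R arr k)).map (Nat.cast : Nat → Int) := by
      rw [List.mem_map]
      refine ⟨k, ?_, rfl⟩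
      rw [List.mem_filter]
      refine ⟨by simp, ?_⟩
      unfold pvGoodM
      rw [Bool.and_eq_true]
      refine ⟨?_, pvIsMin_self arr k⟩
      rw [decide_eq_true_eq]
      omega
    exact List.ne_nil_of_mem hmem

lemma pvQM_nil_iff (R : Int) (arr : List Int) (k : Nat) :
    (pvQM R arr k = [] ↔ pvW R (k+1) = []) := by
  constructor
  · intro h
    by_contra hW
    have := (pvW_nonempty_iff R k).mp hW
    exact absurd h ((pvQM_nonempty_iff R arr k).mpr this)
  · intro h
    by_contra hQ
    have := (pvQM_nonempty_iff R arr k).mp hQ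
    exact absurd h ((pvW_nonempty_iff R k).mpr this)

-- ## head of the filtered range is minimal: earlier indices fail the predicate

lemma filter_head_false (p : Nat → Bool) : ∀ (len s : Nat) (j : Nat) (t : List Nat),
    (List.range' s len).filter p = j :: t → ∀ i, s ≤ i → i < j → p i = false := by
  intro len
  induction len with
  | zero => intro s j t h; simp at h
  | succ m ih =>
    intro s j t h i hsi hij
    rw [List.range'_succ, List.filter_cons] at h
    by_cases hp : p s
    · rw [if_pos (by simp [hp])] at h
      have hj : s = j := (List.cons.injEq _ _ _ _).mp h |>.1
      omega
    · rw [if_neg (by simp [hp])] at h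
      rcases Nat.eq_or_lt_of_le hsi with he | hlt
      · rw [← he]; simpa using hp
      · exact ih (s+1) j t h i (by omega) hij

lemma pvQM_head_min (R : Int) (arr : List Int) (k : Nat) (j : Nat) (t : List Int)
    (hh : pvQM R arr k = (j:Int) :: t) :
    ∀ j' ∈ pvW R (k+1), pvPfx arr j ≤ pvPfx arr j' := by
  rcases hl : (List.range (k+1)).filter (pvGoodM R arr k) with _ | ⟨a, l2⟩
  · rw [pvQM, hl] at hh; simp at hh
  · rw [pvQM, hl] at hh
    simp only [List.map_cons, List.cons.injEq] at hh
    have ha : a = j := by exact_mod_cast hh.1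
    subst ha
    have hmem : a ∈ (List.range (k+1)).filter (pvGoodM R arr k) := by
      rw [hl]; exact List.mem_cons_self
    rcases List.mem_filter.mp hmem with ⟨har, hag⟩
    simp only [List.mem_range] at har
    unfold pvGoodM at hag
    rw [Bool.and_eq_true] at hag
    rcases hag with ⟨haR, hamin⟩
    rw [decide_eq_true_eq] at haR
    have hhead : ∀ i, i < a → pvGoodM R arr k i = false := by
      intro i hi
      exact filter_head_false (pvGoodM R arr k) (k+1) 0 a l2
        (by rw [← List.range_eq_range']; exact hl) i (Nat.zero_le i) hi
    have key : ∀ d : Nat, ∀ j' ∈ pvW R (k+1), a ≤ j' + d → pvPfx arr a ≤ pvPfx arr j' := by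
      intro d
      induction d with
      | zero =>
        intro j' hj' hle
        rcases List.mem_filter.mp hj' with ⟨hj'r, _⟩
        simp only [List.mem_range] at hj'r
        rcases Nat.eq_or_lt_of_le (by omega : a ≤ j') with he | hlt
        · rw [he]
        · exact le_of_lt (pvIsMin_lt arr a k j' hamin hlt (by omega))
      | succ d ihd =>
        intro j' hj' hle
        by_cases hcase : a ≤ j' + d
        · exact ihd j' hj' hcase
        · have hj'a : j' < a := by omega
          rcases List.mem_filter.mp hj' with ⟨hj'r, hj'd⟩
          simp only [List.mem_range] at hj'r
          rw [decide_eq_true_eq] at hj'd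
          have hfalse := hhead j' hj'a
          unfold pvGoodM at hfalse
          have hRj' : decide (((k:Int)+1) - (j':Int) ≤ R) = true := by
            rw [decide_eq_true_eq]
            push_cast at hj'd
            omega
          have hminf : pvIsMin arr j' k = false := by
            cases hm : pvIsMin arr j' k
            · rfl
            · rw [hm, hRj'] at hfalse; simp at hfalse
          rcases pvIsMin_false arr j' k hminf with ⟨j'', hj''k, hj'j'', hple⟩
          rcases lt_trichotomy j'' a with hlt | heq | hgt
          · have hj''w : j'' ∈ pvW R (k+1) := by
              unfold pvW
              rw [List.mem_filter]
              refine ⟨by simp; omega, ?_⟩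
              rw [decide_eq_true_eq]
              push_cast at hj'd ⊢
              omega
            exact le_trans (ihd j'' hj''w (by omega)) hple
          · rw [heq] at hple; exact hple
          · exact le_trans (le_of_lt (pvIsMin_lt arr a k j'' hamin hgt hj''k)) hple
    intro j' hj'
    exact key a j' hj' (by omega)

lemma pvAns_step (R : Int) (arr : List Int) (a0 : Int) (n k : Nat) :
    (match pvQM R arr k with
      | [] => pvAns R arr a0 k
      | j :: _ => max (pvAns R arr a0 k)
          (pvPfx arr (k+1) - PySem.List.pyGetD (pvDp arr n k) j 0))
      = pvAns R arr a0 (k+1) := by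
  rcases hq : pvQM R arr k with _ | ⟨j0, t⟩
  · have hW : pvW R (k+1) = [] := (pvQM_nil_iff R arr k).mp hq
    have hm : pvWmin R arr (k+1) = none := by
      unfold pvWmin
      rw [hW]
      exact (PySem.List.min?_eq_none_iff _ _).mpr rfl
    conv_rhs => rw [pvAns]
    rw [hm]
  · rcases hl : (List.range (k+1)).filter (pvGoodM R arr k) with _ | ⟨a, l2⟩
    · rw [pvQM, hl] at hq; simp at hq
    · have hq' : pvQM R arr k = ((a:Nat):Int) :: l2.map (Nat.cast : Nat → Int) := by
        rw [pvQM, hl]; simp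
      have hj0 : j0 = ((a:Nat):Int) := by
        rw [hq] at hq'
        exact ((List.cons.injEq _ _ _ _).mp hq').1
      have hmem : a ∈ (List.range (k+1)).filter (pvGoodM R arr k) := by
        rw [hl]; exact List.mem_cons_self
      rcases List.mem_filter.mp hmem with ⟨har, hag⟩
      simp only [List.mem_range] at har
      unfold pvGoodM at hag
      rw [Bool.and_eq_true] at hag
      have haR := hag.1
      rw [decide_eq_true_eq] at haR
      have haW : a ∈ pvW R (k+1) := by
        unfold pvW
        rw [List.mem_filter]
        refine ⟨by simp; omega, ?_⟩
        rw [decide_eq_true_eq]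
        push_cast
        omega
      rcases hm : pvWmin R arr (k+1) with _ | jm
      · exfalso
        have := (PySem.List.min?_eq_none_iff _ _).mp hm
        exact List.ne_nil_of_mem haW this
      · have h1 : pvPfx arr jm ≤ pvPfx arr a := PySem.List.min?_isMin hm a haW
        have h2 : pvPfx arr a ≤ pvPfx arr jm :=
          pvQM_head_min R arr k a (l2.map (Nat.cast : Nat → Int)) hq' jm (PySem.List.min?_mem hm)
        have hv : pvPfx arr jm = pvPfx arr a := le_antisymm h1 h2
        rw [hj0]
        show max (pvAns R arr a0 k)
          (pvPfx arr (k+1) - PySem.List.pyGetD (pvDp arr n k) ((a:Nat):Int) 0)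
          = pvAns R arr a0 (k+1)
        rw [pvDp_get arr n k a (by omega), ← hv]
        conv_rhs => rw [pvAns]
        rw [hm]

-- ## the loop invariant

lemma pvFoldA (R : Int) (arr : List Int) (a0 : Int) (k : Nat) (hk : k ≤ arr.length) :
    (PySem.List.enumerate (arr.take k) 0).foldl (maximiseStep R)
      (0, a0, [0], List.replicate (arr.length + 1) 0) = pvState R arr a0 arr.length k := by
  induction k with
  | zero =>
    simp [pvState, pvQ, pvDp, pvAns]
    constructor
    · unfold pvPfx; simp
    constructor
    · have : pvGoodQ R arr 0 0 = true := by unfold pvGoodQ; simp [pvIsMin_self]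
      simp [this]
    · simp [List.replicate_succ]
      unfold pvPfx; simp
  | succ k ih =>
    have hlt : k < arr.length := by omega
    rw [List.take_succ, List.getElem?_eq_getElem hlt]
    simp only [Option.toList_some]
    rw [PySem.List.enumerate_append, List.foldl_append, ih (by omega)]
    have hlen : (List.take k arr).length = k := by simp; omega
    rw [hlen]
    simp only [PySem.List.enumerate_cons, PySem.List.enumerate_nil, List.foldl_cons, List.foldl_nil]
    show maximiseStep R (pvState R arr a0 arr.length k) ((0 + (k:Int)), arr[k])
      = pvState R arr a0 arr.length (k+1)
    unfold maximiseStep pvState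
    simp only [zero_add]
    have hcur : pvPfx arr k + arr[k] = pvPfx arr (k+1) := (pvPfx_succ arr k hlt).symm
    rw [hcur, pvQ1_eq, pvAns_step, pvQ2_eq, pvDp_set arr arr.length k hlt]

-- ## B: value lists

def pvValsB (R : Int) (arr : List Int) (s : Nat) : List Int :=
  (List.range ((min ((s:Int) + R) (arr.length : Int) - (s:Int)).toNat)).map
    (fun (t : Nat) => pvPfx arr (s+t+1) - pvPfx arr s)

def pvValsA (R : Int) (arr : List Int) : Nat → List Int :=
  fun k => (List.range k).flatMap
    (fun i => match pvWmin R arr (i+1) with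
      | none => []
      | some j => [pvPfx arr (i+1) - pvPfx arr j])

lemma pvAns_eq_foldl (R : Int) (arr : List Int) (a0 : Int) (k : Nat) :
    pvAns R arr a0 k = (pvValsA R arr k).foldl max a0 := by
  induction k with
  | zero => rfl
  | succ k ih =>
    rcases hm : pvWmin R arr (k+1) with _ | jm <;>
      simp [pvValsA, List.range_succ, List.flatMap_append, List.foldl_append, hm, pvAns, ih]

lemma pv_ite_max (a b : Int) : (if b > a then b else a) = max a b := by
  by_cases h : b > a
  · simp [h]; omega
  · simp [h]; omega

lemma pvInner_aux (arr : List Int) (s : Nat) : ∀ (m : Nat) (a : Int), s + m ≤ arr.length →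
    (((List.range m).map (fun (t : Nat) => (s:Int) + (t:Int))).foldl
      (fun (p : Int × Int) e =>
        let total := p.1 + PySem.List.pyGetD arr e 0
        (total, if total > p.2 then total else p.2)) (0, a))
    = (pvPfx arr (s+m) - pvPfx arr s,
       ((List.range m).map (fun (t : Nat) => pvPfx arr (s+t+1) - pvPfx arr s)).foldl max a) := by
  intro m
  induction m with
  | zero => intro a h; simp
  | succ m ih =>
    intro a h
    rw [List.range_succ, List.map_append, List.map_append, List.foldl_append, List.foldl_append,
      ih a (by omega)]
    simp only [List.map_cons, List.map_nil, List.foldl_cons, List.foldl_nil]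
    have haccess : PySem.List.pyGetD arr ((s:Int)+(m:Int)) 0 = arr[s+m]'(by omega) := by
      have hcc : (s:Int) + (m:Int) = ((s+m : Nat) : Int) := by push_cast; ring
      rw [hcc, PySem.List.pyGetD_natCast, List.getD_eq_getElem _ _ (by omega)]
    rw [haccess]
    have htot : pvPfx arr (s+m) - pvPfx arr s + arr[s+m]'(by omega)
        = pvPfx arr (s+(m+1)) - pvPfx arr s := by
      have h1 := pvPfx_succ arr (s+m) (by omega)
      have hsm : s + (m+1) = (s+m)+1 := by omega
      rw [hsm, h1]
      ring
    simp only [htot, pv_ite_max]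
    have hss : s + (m+1) = s + m + 1 := by omega
    rw [hss]

lemma pvInnerB (R : Int) (arr : List Int) (s : Nat) (a : Int) (hs : s < arr.length) :
    ((PySem.List.pyRange (s:Int) (min ((s:Int)+R) (arr.length : Int)) 1).foldl
        (fun (p : Int × Int) e =>
          let total := p.1 + PySem.List.pyGetD arr e 0
          (total, if total > p.2 then total else p.2)) (0, a)).2
      = (pvValsB R arr s).foldl max a := by
  rw [PySem.List.pyRange_one]
  have hM : s + (min ((s:Int)+R) ((arr.length:Nat):Int) - (s:Int)).toNat ≤ arr.length := by
    rcases le_total ((s:Int)+R) ((arr.length:Int)) with hmin | hmin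
    · rw [min_eq_left hmin]; omega
    · rw [min_eq_right hmin]; omega
  rw [pvInner_aux arr s _ a hM]
  rfl

lemma pv_foldl_flatten (f : Nat → List Int) : ∀ (l : List Nat) (a : Int),
    l.foldl (fun a s => (f s).foldl max a) a = (l.flatMap f).foldl max a := by
  intro l
  induction l with
  | nil => intro a; rfl
  | cons x t ih => intro a; simp only [List.foldl_cons, List.flatMap_cons, List.foldl_append, ih]

lemma pvOuterB (R : Int) (arr : List Int) (a0 : Int) :
    (PySem.List.pyRange 0 (arr.length : Int) 1).foldl
      (fun ans s =>
        ((PySem.List.pyRange s (min (s+R) (arr.length : Int)) 1).foldl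
          (fun (p : Int × Int) e =>
            let total := p.1 + PySem.List.pyGetD arr e 0
            (total, if total > p.2 then total else p.2)) (0, ans)).2) a0
      = ((List.range arr.length).flatMap (pvValsB R arr)).foldl max a0 := by
  rw [PySem.List.pyRange_zero_nat, List.foldl_map]
  rw [PySem.List.foldl_congr_mem _ _ (fun a s => (pvValsB R arr s).foldl max a) _ ?_]
  · exact pv_foldl_flatten (pvValsB R arr) (List.range arr.length) a0
  · intro acc s hs
    simp only [List.mem_range] at hs
    exact pvInnerB R arr s acc hs

-- ## folded maxima over cross-bounded lists agree

lemma foldl_max_le_foldl_max (a : Int) (l1 l2 : List Int)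
    (h : ∀ x ∈ l1, ∃ y ∈ l2, x ≤ y) : l1.foldl max a ≤ l2.foldl max a := by
  rcases PySem.List.foldl_max_mem l1 a with h1 | h1
  · rw [h1]; exact (PySem.List.le_foldl_max l2 a).1
  · rcases h _ h1 with ⟨y, hy, hxy⟩
    exact le_trans hxy ((PySem.List.le_foldl_max l2 a).2 y hy)

lemma pvValsA_le_B (R : Int) (arr : List Int) :
    ∀ x ∈ pvValsA R arr arr.length, ∃ y ∈ (List.range arr.length).flatMap (pvValsB R arr), x ≤ y := by
  intro x hx
  unfold pvValsA at hx
  rw [List.mem_flatMap] at hx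
  rcases hx with ⟨i, hi, hxi⟩
  simp only [List.mem_range] at hi
  rcases hm : pvWmin R arr (i+1) with _ | jm
  · rw [hm] at hxi; simp at hxi
  · rw [hm] at hxi
    simp only [List.mem_singleton] at hxi
    subst hxi
    have hjm := PySem.List.min?_mem hm
    unfold pvW at hjm
    rcases List.mem_filter.mp hjm with ⟨hjr, hjd⟩
    simp only [List.mem_range] at hjr
    rw [decide_eq_true_eq] at hjd
    push_cast at hjd
    refine ⟨pvPfx arr (i+1) - pvPfx arr jm, ?_, le_refl _⟩
    rw [List.mem_flatMap]
    refine ⟨jm, by simp only [List.mem_range]; omega, ?_⟩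
    unfold pvValsB
    rw [List.mem_map]
    refine ⟨i - jm, ?_, ?_⟩
    · simp only [List.mem_range]
      rcases le_total ((jm:Int)+R) ((arr.length:Int)) with hmin | hmin
      · rw [min_eq_left hmin]; omega
      · rw [min_eq_right hmin]; omega
    · have heq : jm + (i - jm) + 1 = i + 1 := by omega
      rw [heq]

lemma pvValsB_le_A (R : Int) (arr : List Int) :
    ∀ x ∈ (List.range arr.length).flatMap (pvValsB R arr), ∃ y ∈ pvValsA R arr arr.length, x ≤ y := by
  intro x hx
  rw [List.mem_flatMap] at hx
  rcases hx with ⟨s, hs, hxs⟩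
  simp only [List.mem_range] at hs
  unfold pvValsB at hxs
  rw [List.mem_map] at hxs
  rcases hxs with ⟨t, ht, hxt⟩
  simp only [List.mem_range] at ht
  subst hxt
  have hbound : (t:Int) < min ((s:Int)+R) ((arr.length:Int)) - (s:Int) := by
    rcases le_total ((s:Int)+R) ((arr.length:Int)) with hmin | hmin
    · rw [min_eq_left hmin] at ht ⊢; omega
    · rw [min_eq_right hmin] at ht ⊢; omega
  have he_len : s + t + 1 ≤ arr.length := by
    have := min_le_right ((s:Int)+R) ((arr.length:Int))
    omega
  have he_R : ((s+t+1 : Nat):Int) - (s:Int) ≤ R := by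
    have := min_le_left ((s:Int)+R) ((arr.length:Int))
    push_cast
    omega
  have hsW : s ∈ pvW R (s+t+1) := by
    unfold pvW
    rw [List.mem_filter]
    refine ⟨by simp only [List.mem_range]; omega, ?_⟩
    rw [decide_eq_true_eq]
    push_cast at he_R ⊢
    omega
  rcases hm : pvWmin R arr (s+t+1) with _ | jm
  · exfalso
    exact List.ne_nil_of_mem hsW ((PySem.List.min?_eq_none_iff _ _).mp hm)
  · have hle : pvPfx arr jm ≤ pvPfx arr s := PySem.List.min?_isMin hm s hsW
    refine ⟨pvPfx arr (s+t+1) - pvPfx arr jm, ?_, by omega⟩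
    unfold pvValsA
    rw [List.mem_flatMap]
    refine ⟨s+t, by simp only [List.mem_range]; omega, ?_⟩
    rw [show s+t+1 = (s+t)+1 from rfl] at hm
    simp only [hm]
    simp

lemma pv_main (R : Int) (cycle : List Int) (hc : cycle ≠ []) :
    maximise R cycle = maximise_alt R cycle := by
  unfold maximise maximise_alt
  rw [if_neg hc, if_neg hc]
  dsimp only
  have hL : (cycle ++ cycle).length = 2 * cycle.length := by simp; ring
  have hrep : 2 * cycle.length + 1 = (cycle ++ cycle).length + 1 := by omega
  have hfold := pvFoldA R (cycle ++ cycle) ((PySem.List.max? cycle (fun y => y)).getD 0)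
    ((cycle ++ cycle).length) (le_refl _)
  rw [List.take_length] at hfold
  have hcast : 2 * ((cycle.length:Nat):Int) = (((cycle ++ cycle).length:Nat):Int) := by
    push_cast [hL]; ring
  rw [hrep, hfold]
  show pvAns R (cycle ++ cycle) ((PySem.List.max? cycle (fun y => y)).getD 0)
    ((cycle ++ cycle).length) = _
  rw [pvAns_eq_foldl, hcast, pvOuterB]
  exact le_antisymm
    (foldl_max_le_foldl_max _ _ _ (pvValsA_le_B R (cycle ++ cycle)))
    (foldl_max_le_foldl_max _ _ _ (pvValsB_le_A R (cycle ++ cycle)))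

-- ===== VERDICT (by name: the statement is the Claim_ definition above) =====
theorem maximise_spec : Claim_equal_maximise := by
  intro R cycle _ hpre
  unfold Spec_maximise
  exact pv_main R cycle hpre
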